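-- pv_equiv track=rewrite | github.com/subhamb123/WSU-Coding-Projects | CPTS 355/Python/Assignment 3/HW3.py | merge_logs
-- ===== SOURCE A (Python) =====
-- def combine_dict(log1, log2):
--      aggregate = dict()
--
--      for day in log1.keys():
--           if aggregate.get(day) == None:
--                aggregate[day] = log1.get(day)
--           else:
--                aggregate[day] += log1.get(day)
--
--      for day in log2.keys():
--           if aggregate.get(day) == None:
--                aggregate[day] = log2.get(day)
--           else:
--                aggregate[day] += log2.get(day)
--
--      return aggregate
--
-- def merge_logs(list):
--      aggregate = dict()
--
--      for log in list:
--           for course, days in log.items():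
--                if aggregate.get(course) == None:
--                     sub = dict()
--                     for day in days:
--                          if sub.get(day) == None:
--                               sub[day] = days.get(day)
--                          else:
--                               sub[day] += days.get(day)
--
--                     aggregate[course] = sub
--                else:
--                     sub = dict()
--                     for day in days:
--                          if sub.get(day) == None:
--                               sub[day] = days.get(day)
--                          else:
--                               sub[day] += days.get(day)
--
--                     aggregate[course] = combine_dict(aggregate.get(course), sub)
--
--      return aggregate
-- ===== SOURCE B (Python) =====
-- def merge_logs(list):
--     aggregate = {}
--     for log in list:
--         for course, days in log.items():
--             inner = aggregate.setdefault(course, {})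
--             for day, count in days.items():
--                 inner[day] = inner.get(day, 0) + count
--     return aggregate
-- ===== Notes on version B (the rewrite author's own statement) =====
-- stated objective: faster
-- what changed: Drops combine_dict and the per-course sub-dict rebuild: one direct accumulation pass with setdefault and get-default addition, never copying or re-merging whole course dicts.
import Mathlib
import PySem

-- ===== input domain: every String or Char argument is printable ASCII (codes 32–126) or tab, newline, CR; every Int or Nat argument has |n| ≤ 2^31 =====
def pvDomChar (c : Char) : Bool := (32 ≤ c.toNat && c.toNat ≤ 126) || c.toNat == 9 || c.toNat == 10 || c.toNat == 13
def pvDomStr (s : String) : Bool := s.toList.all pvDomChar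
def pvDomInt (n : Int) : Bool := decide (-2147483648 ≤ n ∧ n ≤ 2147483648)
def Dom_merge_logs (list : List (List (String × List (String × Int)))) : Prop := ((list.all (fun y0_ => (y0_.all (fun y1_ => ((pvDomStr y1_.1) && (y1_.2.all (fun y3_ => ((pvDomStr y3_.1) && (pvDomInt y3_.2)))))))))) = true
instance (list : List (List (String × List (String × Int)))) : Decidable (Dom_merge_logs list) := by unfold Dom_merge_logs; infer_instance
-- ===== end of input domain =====

-- B replaces A's copy-then-combine_dict per-course merging by one direct accumulation pass
-- over the entries, never rebuilding a course dict (objective: faster, measurably so).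
-- Return-value equivalence; neither program observably mutates its argument.

-- ===== PORT A =====
-- Python A writes this sub-dict-building block verbatim in both branches of merge_logs; it is
-- factored here once, unchanged. 'day' ranges over days.keys, so days.get(day) is always
-- some and '(…).getD 0' is exact there; 'cur' is the current value sub[day] read by '+='.
def pvSubA (days : PySem.Dict String Int) : PySem.Dict String Int :=
  days.keys.foldl (fun sub day =>
    match sub.get? day with
    | none => sub.insert day ((days.get? day).getD 0)
    | some cur => sub.insert day (cur + (days.get? day).getD 0)) PySem.Dict.empty

def combine_dict (log1 log2 : PySem.Dict String Int) : PySem.Dict String Int :=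
  log2.keys.foldl (fun aggregate day =>
    match aggregate.get? day with
    | none => aggregate.insert day ((log2.get? day).getD 0)
    | some cur => aggregate.insert day (cur + (log2.get? day).getD 0))
    (log1.keys.foldl (fun aggregate day =>
      match aggregate.get? day with
      | none => aggregate.insert day ((log1.get? day).getD 0)
      | some cur => aggregate.insert day (cur + (log1.get? day).getD 0)) PySem.Dict.empty)

-- Association lists stand for Python dicts; each is read through PySem.Dict.ofList (exactly
-- dict(pairs)); the resulting dict of dicts is returned as its nested items lists.
def merge_logs (list : List (List (String × List (String × Int)))) : List (String × List (String × Int)) :=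
  (list.foldl (fun aggregate log =>
      (PySem.Dict.ofList log).items.foldl (fun aggregate p =>
        match aggregate.get? p.1 with
        | none => aggregate.insert p.1 (pvSubA (PySem.Dict.ofList p.2))
        | some prev => aggregate.insert p.1 (combine_dict prev (pvSubA (PySem.Dict.ofList p.2))))
        aggregate)
    PySem.Dict.empty).items.map (fun p => (p.1, p.2.items))

-- ===== PORT B =====
-- inner = aggregate.setdefault(course, {}) followed by in-place updates of inner is modelled
-- by reading aggregate.getD course empty, updating it, and writing it back with insert
-- (insert keeps the position of an existing key and appends a new one, as setdefault does).
def merge_logs_alt (list : List (List (String × List (String × Int)))) : List (String × List (String × Int)) :=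
  (list.foldl (fun aggregate log =>
      (PySem.Dict.ofList log).items.foldl (fun aggregate p =>
        aggregate.insert p.1
          ((PySem.Dict.ofList p.2).items.foldl
            (fun inner q => inner.insert q.1 (inner.getD q.1 0 + q.2))
            (aggregate.getD p.1 PySem.Dict.empty)))
        aggregate)
    PySem.Dict.empty).items.map (fun p => (p.1, p.2.items))

-- ===== PRECONDITION & SPEC =====
def Spec_merge_logs (list : List (List (String × List (String × Int)))) (out : List (String × List (String × Int))) : Prop := out = merge_logs_alt list
instance (list : List (List (String × List (String × Int)))) (out : List (String × List (String × Int))) : Decidable (Spec_merge_logs list out) := by unfold Spec_merge_logs; infer_instance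

-- ===== CLAIM (what is proved, stated in full; the proofs are below) =====
def Claim_equal_merge_logs : Prop := ∀ (list : List (List (String × List (String × Int)))), Dom_merge_logs list → Spec_merge_logs list (merge_logs list)

-- ===== LEMMAS AND PROOFS =====

-- B's accumulation step over entry pairs: the canonical form both programs reduce to.
def pvAdd (l : List (String × Int)) (d : PySem.Dict String Int) : PySem.Dict String Int :=
  l.foldl (fun a q => a.insert q.1 (a.getD q.1 0 + q.2)) d

-- A's if-none-insert-else-add step equals B's getD-add step, pointwise.
theorem pv_step_eq (a : PySem.Dict String Int) (k : String) (v : Int) :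
    (match a.get? k with
     | none => a.insert k v
     | some cur => a.insert k (cur + v)) = a.insert k (a.getD k 0 + v) := by
  cases h : a.get? k with
  | none => rw [PySem.Dict.getD_of_get?_eq_none _ _ h, zero_add]
  | some cur => rw [PySem.Dict.getD_of_get?_eq_some _ _ h]

-- A's loop shape over d.keys reading d.get? at each key is pvAdd over d.items (nodup keys).
theorem pv_copyloop (d : PySem.Dict String Int) (hn : d.keys.Nodup)
    (init : PySem.Dict String Int) :
    d.keys.foldl (fun a day =>
      match a.get? day with
      | none => a.insert day ((d.get? day).getD 0)
      | some cur => a.insert day (cur + (d.get? day).getD 0)) init = pvAdd d.items init := by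
  show (d.items.map Prod.fst).foldl _ init = _
  rw [List.foldl_map]
  refine PySem.List.foldl_congr_mem _ _ _ _ (fun a q hq => ?_)
  have h : d.get? q.1 = some q.2 := PySem.Dict.get?_of_mem_items d (by simpa using hq) hn
  rw [h]
  exact pv_step_eq a q.1 q.2

-- Inserting fresh, key-distinct pairs one by one appends them.
theorem pv_rebuild (l : List (String × Int)) (d : PySem.Dict String Int)
    (hf : ∀ q ∈ l, d.contains q.1 = false) (hn : (l.map Prod.fst).Nodup) :
    pvAdd l d = PySem.Dict.mk (d.items ++ l) := by
  induction l generalizing d with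
  | nil => simp [pvAdd]
  | cons q t ih =>
    have hq : d.contains q.1 = false := hf q (by simp)
    have hz : d.getD q.1 0 = 0 := PySem.Dict.getD_of_not_contains d 0 hq
    simp only [List.map_cons, List.nodup_cons, List.mem_map] at hn
    show pvAdd t (d.insert q.1 (d.getD q.1 0 + q.2)) = _
    rw [ih _ ?_ hn.2]
    · have hit := PySem.Dict.items_insert_of_not_contains d (d.getD q.1 0 + q.2) hq
      rw [hit, hz, zero_add, List.append_assoc]
      rfl
    · intro r hr
      rw [PySem.Dict.contains_insert]
      have h1 : (r.1 == q.1) = false := by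
        have : q.1 ≠ r.1 := fun h => hn.1 ⟨r, hr, h.symm⟩
        simpa [beq_iff_eq] using fun h => this h.symm
      rw [h1, hf r (by simp [hr])]
      rfl

-- Rebuilding a nodup-key dict from its own items gives it back.
theorem pv_rebuild_self (d : PySem.Dict String Int) (hn : d.keys.Nodup) :
    pvAdd d.items PySem.Dict.empty = d := by
  rw [pv_rebuild d.items PySem.Dict.empty (fun q _ => PySem.Dict.contains_empty q.1) hn]
  rfl

theorem pv_nodup_add (l : List (String × Int)) (d : PySem.Dict String Int)
    (hn : d.keys.Nodup) : (pvAdd l d).keys.Nodup := by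
  induction l generalizing d with
  | nil => exact hn
  | cons q t ih => exact ih _ (PySem.Dict.nodup_keys_insert _ _ _ hn)

-- pvSubA copies a nodup-key dict.
theorem pv_subA_eq (d : PySem.Dict String Int) (hn : d.keys.Nodup) : pvSubA d = d := by
  unfold pvSubA
  rw [pv_copyloop d hn, pv_rebuild_self d hn]

-- combine_dict, on nodup-key dicts, is B's accumulation of the second into the first.
theorem pv_combine_eq (a b : PySem.Dict String Int)
    (ha : a.keys.Nodup) (hb : b.keys.Nodup) : combine_dict a b = pvAdd b.items a := by
  unfold combine_dict
  rw [pv_copyloop a ha, pv_rebuild_self a ha, pv_copyloop b hb]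

-- The per-(course, days)-pair steps of the two programs, as they appear in the ports.
def pvStepA (aggregate : PySem.Dict String (PySem.Dict String Int))
    (p : String × List (String × Int)) : PySem.Dict String (PySem.Dict String Int) :=
  match aggregate.get? p.1 with
  | none => aggregate.insert p.1 (pvSubA (PySem.Dict.ofList p.2))
  | some prev => aggregate.insert p.1 (combine_dict prev (pvSubA (PySem.Dict.ofList p.2)))

def pvStepB (aggregate : PySem.Dict String (PySem.Dict String Int))
    (p : String × List (String × Int)) : PySem.Dict String (PySem.Dict String Int) :=
  aggregate.insert p.1 (pvAdd (PySem.Dict.ofList p.2).items (aggregate.getD p.1 PySem.Dict.empty))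

-- Invariant: every value stored in the aggregate has nodup keys.
def pvInv (agg : PySem.Dict String (PySem.Dict String Int)) : Prop :=
  ∀ k v, agg.get? k = some v → v.keys.Nodup

theorem pv_step_main (agg : PySem.Dict String (PySem.Dict String Int))
    (p : String × List (String × Int)) (hInv : pvInv agg) :
    pvStepA agg p = pvStepB agg p := by
  have hnd := PySem.Dict.nodup_keys_ofList p.2
  unfold pvStepA pvStepB
  cases h : agg.get? p.1 with
  | none =>
    show agg.insert p.1 (pvSubA (PySem.Dict.ofList p.2)) = _
    rw [PySem.Dict.getD_of_get?_eq_none _ _ h, pv_subA_eq _ hnd, pv_rebuild_self _ hnd]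
  | some prev =>
    show agg.insert p.1 (combine_dict prev (pvSubA (PySem.Dict.ofList p.2))) = _
    rw [PySem.Dict.getD_of_get?_eq_some _ _ h, pv_subA_eq _ hnd,
      pv_combine_eq prev _ (hInv _ _ h) hnd]

theorem pv_inv_insert (agg : PySem.Dict String (PySem.Dict String Int))
    (k : String) (v : PySem.Dict String Int) (hInv : pvInv agg) (hv : v.keys.Nodup) :
    pvInv (agg.insert k v) := by
  intro k' v' h
  rw [PySem.Dict.get?_insert] at h
  by_cases hk : k' = k
  · rw [if_pos hk] at h
    injection h with h
    exact h ▸ hv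
  · rw [if_neg hk] at h
    exact hInv _ _ h

theorem pv_inv_getD (agg : PySem.Dict String (PySem.Dict String Int)) (k : String)
    (hInv : pvInv agg) : (agg.getD k PySem.Dict.empty).keys.Nodup := by
  cases h : agg.get? k with
  | none =>
    rw [PySem.Dict.getD_of_get?_eq_none _ _ h, PySem.Dict.keys_empty]
    exact List.nodup_nil
  | some v =>
    rw [PySem.Dict.getD_of_get?_eq_some _ _ h]
    exact hInv _ _ h

-- The inner loop over one log: A's loop equals B's loop, and B's preserves the invariant.
theorem pv_inner (ps : List (String × List (String × Int)))
    (agg : PySem.Dict String (PySem.Dict String Int)) (hInv : pvInv agg) :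
    ps.foldl pvStepA agg = ps.foldl pvStepB agg ∧ pvInv (ps.foldl pvStepB agg) := by
  induction ps generalizing agg with
  | nil => exact ⟨rfl, hInv⟩
  | cons p t ih =>
    have hInv' : pvInv (pvStepB agg p) :=
      pv_inv_insert _ _ _ hInv (pv_nodup_add _ _ (pv_inv_getD agg p.1 hInv))
    refine ⟨?_, (ih _ hInv').2⟩
    show t.foldl pvStepA (pvStepA agg p) = t.foldl pvStepB (pvStepB agg p)
    rw [pv_step_main agg p hInv]
    exact (ih _ hInv').1

-- The outer loop over all logs.
theorem pv_outer (logs : List (List (String × List (String × Int))))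
    (agg : PySem.Dict String (PySem.Dict String Int)) (hInv : pvInv agg) :
    logs.foldl (fun aggregate log => (PySem.Dict.ofList log).items.foldl pvStepA aggregate) agg
      = logs.foldl (fun aggregate log => (PySem.Dict.ofList log).items.foldl pvStepB aggregate) agg := by
  induction logs generalizing agg with
  | nil => rfl
  | cons log t ih =>
    have h := pv_inner (PySem.Dict.ofList log).items agg hInv
    show t.foldl _ ((PySem.Dict.ofList log).items.foldl pvStepA agg) = t.foldl _ _
    rw [h.1]
    exact ih _ h.2

-- ===== VERDICT (by name: the statement is the Claim_ definition above) =====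
theorem merge_logs_spec : Claim_equal_merge_logs := by
  intro list _
  show merge_logs list = merge_logs_alt list
  show (list.foldl (fun aggregate log => (PySem.Dict.ofList log).items.foldl pvStepA aggregate)
        PySem.Dict.empty).items.map (fun p => (p.1, p.2.items))
    = (list.foldl (fun aggregate log => (PySem.Dict.ofList log).items.foldl pvStepB aggregate)
        PySem.Dict.empty).items.map (fun p => (p.1, p.2.items))
  rw [pv_outer list PySem.Dict.empty (fun k v h => by
    rw [PySem.Dict.get?_empty] at h
    cases h)]
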